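-- pv_equiv track=rewrite | github.com/vinaykumarvk/Generic-RAG-app | apps/worker/src/pipeline/kg_extractor.py | _map_entity_type
-- ===== SOURCE A (Python) =====
-- _TYPE_KEYWORDS = {
--     "person": ["person", "individual", "man", "woman", "officer", "employee", "manager", "director", "witness"],
--     "organization": ["organization", "company", "corporation", "firm", "institution", "agency", "department", "ministry"],
--     "authority": ["authority", "government", "regulator", "commission", "board", "council", "tribunal"],
--     "legal_instrument": ["law", "act", "regulation", "statute", "ordinance", "policy", "directive", "treaty", "code"],
--     "permission": ["permission", "license", "permit", "approval", "authorization", "certificate", "exemption"],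
--     "obligation": ["obligation", "requirement", "duty", "mandate", "compliance"],
--     "violation": ["violation", "offence", "offense", "breach", "infringement", "crime", "misconduct"],
--     "role": ["role", "title", "position", "rank", "designation", "occupation"],
--     "group": ["group", "team", "committee", "unit", "division", "taskforce"],
--     "location": ["location", "address", "place", "city", "town", "village", "street", "road"],
--     "facility": ["facility", "building", "office", "warehouse", "plant", "site", "headquarters"],
--     "region": ["region", "jurisdiction", "district", "state", "province", "country", "territory", "zone"],
--     "date": ["date", "day", "month", "year"],
--     "event": ["event", "incident", "meeting", "hearing", "trial", "conference", "ceremony", "occurrence"],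
--     "period": ["period", "duration", "term", "timeframe", "deadline", "interval"],
--     "concept": ["concept", "topic", "idea", "theme", "principle", "theory", "subject"],
--     "technology": ["technology", "system", "software", "platform", "tool", "application", "database"],
--     "method": ["method", "process", "procedure", "workflow", "protocol", "technique", "approach"],
--     "standard": ["standard", "specification", "norm", "guideline", "benchmark", "framework"],
--     "metric": ["metric", "kpi", "indicator", "measure", "score", "rate", "percentage"],
--     "evidence": ["evidence", "exhibit", "proof", "record", "artifact", "documentation"],
--     "condition": ["condition", "prerequisite", "criterion", "threshold", "trigger"],
--     "monetary_amount": ["amount", "price", "cost", "fee", "fine", "budget", "salary", "payment", "dollar", "euro"],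
--     "account": ["account", "fund", "budget", "grant", "allocation"],
--     "transaction": ["transaction", "transfer", "payment", "disbursement", "receipt"],
--     "risk": ["risk", "hazard", "threat", "vulnerability", "danger", "exposure"],
--     "control": ["control", "safeguard", "measure", "mitigation", "countermeasure", "protection"],
--     "finding": ["finding", "recommendation", "observation", "conclusion", "opinion", "assessment"],
--     "status": ["status", "state", "phase", "stage", "progress", "outcome"],
--     "reference": ["reference", "citation", "source", "bibliography", "footnote"],
--     "document": ["document", "report", "letter", "memo", "brief", "filing", "submission"],
-- }
--
-- def _map_entity_type(extracted_text: str, classification: str, valid_types: set) -> str: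
--     """Map an extraction classification to a valid ontology type.
--
--     If the classification is already valid, use it directly.
--     Otherwise, use keyword matching on the extracted text and classification
--     to find the best ontology type. Falls back to 'concept'.
--     """
--     if classification in valid_types:
--         return classification
--
--     # Try keyword matching against the text + classification
--     search_text = f"{extracted_text} {classification}".lower()
--     best_type = "concept"
--     best_score = 0
--
--     for node_type, keywords in _TYPE_KEYWORDS.items():
--         if node_type not in valid_types:
--             continue
--         for kw in keywords:
--             if kw in search_text:
--                 score = len(kw)
--                 if score > best_score:
--                     best_score = score
--                     best_type = node_type
--
--     return best_type
-- ===== SOURCE B (Python) =====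
-- # flat (keyword, type) pair list, in the original table's order
-- _PAIRS_RAW = [
--     ('person', 'person'), ('individual', 'person'), ('man', 'person'), ('woman', 'person'),
--     ('officer', 'person'), ('employee', 'person'), ('manager', 'person'), ('director', 'person'),
--     ('witness', 'person'), ('organization', 'organization'), ('company', 'organization'), ('corporation', 'organization'),
--     ('firm', 'organization'), ('institution', 'organization'), ('agency', 'organization'), ('department', 'organization'),
--     ('ministry', 'organization'), ('authority', 'authority'), ('government', 'authority'), ('regulator', 'authority'),
--     ('commission', 'authority'), ('board', 'authority'), ('council', 'authority'), ('tribunal', 'authority'),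
--     ('law', 'legal_instrument'), ('act', 'legal_instrument'), ('regulation', 'legal_instrument'), ('statute', 'legal_instrument'),
--     ('ordinance', 'legal_instrument'), ('policy', 'legal_instrument'), ('directive', 'legal_instrument'), ('treaty', 'legal_instrument'),
--     ('code', 'legal_instrument'), ('permission', 'permission'), ('license', 'permission'), ('permit', 'permission'),
--     ('approval', 'permission'), ('authorization', 'permission'), ('certificate', 'permission'), ('exemption', 'permission'),
--     ('obligation', 'obligation'), ('requirement', 'obligation'), ('duty', 'obligation'), ('mandate', 'obligation'),
--     ('compliance', 'obligation'), ('violation', 'violation'), ('offence', 'violation'), ('offense', 'violation'),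
--     ('breach', 'violation'), ('infringement', 'violation'), ('crime', 'violation'), ('misconduct', 'violation'),
--     ('role', 'role'), ('title', 'role'), ('position', 'role'), ('rank', 'role'),
--     ('designation', 'role'), ('occupation', 'role'), ('group', 'group'), ('team', 'group'),
--     ('committee', 'group'), ('unit', 'group'), ('division', 'group'), ('taskforce', 'group'),
--     ('location', 'location'), ('address', 'location'), ('place', 'location'), ('city', 'location'),
--     ('town', 'location'), ('village', 'location'), ('street', 'location'), ('road', 'location'),
--     ('facility', 'facility'), ('building', 'facility'), ('office', 'facility'), ('warehouse', 'facility'),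
--     ('plant', 'facility'), ('site', 'facility'), ('headquarters', 'facility'), ('region', 'region'),
--     ('jurisdiction', 'region'), ('district', 'region'), ('state', 'region'), ('province', 'region'),
--     ('country', 'region'), ('territory', 'region'), ('zone', 'region'), ('date', 'date'),
--     ('day', 'date'), ('month', 'date'), ('year', 'date'), ('event', 'event'),
--     ('incident', 'event'), ('meeting', 'event'), ('hearing', 'event'), ('trial', 'event'),
--     ('conference', 'event'), ('ceremony', 'event'), ('occurrence', 'event'), ('period', 'period'),
--     ('duration', 'period'), ('term', 'period'), ('timeframe', 'period'), ('deadline', 'period'),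
--     ('interval', 'period'), ('concept', 'concept'), ('topic', 'concept'), ('idea', 'concept'),
--     ('theme', 'concept'), ('principle', 'concept'), ('theory', 'concept'), ('subject', 'concept'),
--     ('technology', 'technology'), ('system', 'technology'), ('software', 'technology'), ('platform', 'technology'),
--     ('tool', 'technology'), ('application', 'technology'), ('database', 'technology'), ('method', 'method'),
--     ('process', 'method'), ('procedure', 'method'), ('workflow', 'method'), ('protocol', 'method'),
--     ('technique', 'method'), ('approach', 'method'), ('standard', 'standard'), ('specification', 'standard'),
--     ('norm', 'standard'), ('guideline', 'standard'), ('benchmark', 'standard'), ('framework', 'standard'),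
--     ('metric', 'metric'), ('kpi', 'metric'), ('indicator', 'metric'), ('measure', 'metric'),
--     ('score', 'metric'), ('rate', 'metric'), ('percentage', 'metric'), ('evidence', 'evidence'),
--     ('exhibit', 'evidence'), ('proof', 'evidence'), ('record', 'evidence'), ('artifact', 'evidence'),
--     ('documentation', 'evidence'), ('condition', 'condition'), ('prerequisite', 'condition'), ('criterion', 'condition'),
--     ('threshold', 'condition'), ('trigger', 'condition'), ('amount', 'monetary_amount'), ('price', 'monetary_amount'),
--     ('cost', 'monetary_amount'), ('fee', 'monetary_amount'), ('fine', 'monetary_amount'), ('budget', 'monetary_amount'),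
--     ('salary', 'monetary_amount'), ('payment', 'monetary_amount'), ('dollar', 'monetary_amount'), ('euro', 'monetary_amount'),
--     ('account', 'account'), ('fund', 'account'), ('budget', 'account'), ('grant', 'account'),
--     ('allocation', 'account'), ('transaction', 'transaction'), ('transfer', 'transaction'), ('payment', 'transaction'),
--     ('disbursement', 'transaction'), ('receipt', 'transaction'), ('risk', 'risk'), ('hazard', 'risk'),
--     ('threat', 'risk'), ('vulnerability', 'risk'), ('danger', 'risk'), ('exposure', 'risk'),
--     ('control', 'control'), ('safeguard', 'control'), ('measure', 'control'), ('mitigation', 'control'),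
--     ('countermeasure', 'control'), ('protection', 'control'), ('finding', 'finding'), ('recommendation', 'finding'),
--     ('observation', 'finding'), ('conclusion', 'finding'), ('opinion', 'finding'), ('assessment', 'finding'),
--     ('status', 'status'), ('state', 'status'), ('phase', 'status'), ('stage', 'status'),
--     ('progress', 'status'), ('outcome', 'status'), ('reference', 'reference'), ('citation', 'reference'),
--     ('source', 'reference'), ('bibliography', 'reference'), ('footnote', 'reference'), ('document', 'document'),
--     ('report', 'document'), ('letter', 'document'), ('memo', 'document'), ('brief', 'document'),
--     ('filing', 'document'), ('submission', 'document'),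
-- ]
--
-- # B: a different data structure -- the keyword table kept as one flat list of
-- # (keyword, type) pairs, sorted once longest keyword first (stable), then a
-- # recursive early-exit scan returns the type of the first matching pair.
-- _PAIRS = sorted(_PAIRS_RAW, key=lambda p: len(p[0]), reverse=True)
--
--
-- def _first_match(pairs, hay, valid_types):
--     if not pairs:
--         return "concept"
--     kw, t = pairs[0]
--     if t in valid_types and kw in hay:
--         return t
--     return _first_match(pairs[1:], hay, valid_types)
--
--
-- def _map_entity_type(extracted_text: str, classification: str, valid_types: set) -> str:
--     if classification in valid_types:
--         return classification
--     hay = extracted_text.lower() + " " + classification.lower()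
--     return _first_match(_PAIRS, hay, valid_types)
-- ===== Notes on version B (the rewrite author's own statement) =====
-- stated objective: alternative
-- what changed: B stores the keywords as one flat module-level list of (keyword, type) pairs stably sorted longest keyword first and a recursive helper returns the type of the first matching pair (early exit), instead of A's nested dict-of-lists scan with a best-score accumulator.
import Mathlib
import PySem

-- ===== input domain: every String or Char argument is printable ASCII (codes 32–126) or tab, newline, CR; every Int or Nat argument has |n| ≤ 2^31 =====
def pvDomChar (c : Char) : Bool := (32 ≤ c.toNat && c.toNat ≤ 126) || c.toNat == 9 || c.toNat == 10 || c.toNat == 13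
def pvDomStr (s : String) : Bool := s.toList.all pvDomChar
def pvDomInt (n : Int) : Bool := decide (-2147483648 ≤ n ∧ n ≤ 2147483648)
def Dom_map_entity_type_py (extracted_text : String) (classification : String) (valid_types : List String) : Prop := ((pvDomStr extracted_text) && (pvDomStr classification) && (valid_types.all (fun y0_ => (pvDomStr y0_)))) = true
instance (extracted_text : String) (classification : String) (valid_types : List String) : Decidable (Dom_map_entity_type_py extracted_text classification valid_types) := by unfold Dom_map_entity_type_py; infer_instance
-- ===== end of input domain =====

-- B keeps the keywords as one flat (keyword, type) pair list sorted once longest keyword first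
-- (stable) and does a recursive early-exit scan for the first match, replacing A's nested
-- best-score accumulator fold; objective: alternative.

-- ===== PORT A =====
-- the module constant _TYPE_KEYWORDS, in dict insertion order
def pvTable : List (String × List String) := [
  ("person", ["person", "individual", "man", "woman", "officer", "employee", "manager", "director", "witness"]),
  ("organization", ["organization", "company", "corporation", "firm", "institution", "agency", "department", "ministry"]),
  ("authority", ["authority", "government", "regulator", "commission", "board", "council", "tribunal"]),
  ("legal_instrument", ["law", "act", "regulation", "statute", "ordinance", "policy", "directive", "treaty", "code"]),
  ("permission", ["permission", "license", "permit", "approval", "authorization", "certificate", "exemption"]),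
  ("obligation", ["obligation", "requirement", "duty", "mandate", "compliance"]),
  ("violation", ["violation", "offence", "offense", "breach", "infringement", "crime", "misconduct"]),
  ("role", ["role", "title", "position", "rank", "designation", "occupation"]),
  ("group", ["group", "team", "committee", "unit", "division", "taskforce"]),
  ("location", ["location", "address", "place", "city", "town", "village", "street", "road"]),
  ("facility", ["facility", "building", "office", "warehouse", "plant", "site", "headquarters"]),
  ("region", ["region", "jurisdiction", "district", "state", "province", "country", "territory", "zone"]),
  ("date", ["date", "day", "month", "year"]),
  ("event", ["event", "incident", "meeting", "hearing", "trial", "conference", "ceremony", "occurrence"]),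
  ("period", ["period", "duration", "term", "timeframe", "deadline", "interval"]),
  ("concept", ["concept", "topic", "idea", "theme", "principle", "theory", "subject"]),
  ("technology", ["technology", "system", "software", "platform", "tool", "application", "database"]),
  ("method", ["method", "process", "procedure", "workflow", "protocol", "technique", "approach"]),
  ("standard", ["standard", "specification", "norm", "guideline", "benchmark", "framework"]),
  ("metric", ["metric", "kpi", "indicator", "measure", "score", "rate", "percentage"]),
  ("evidence", ["evidence", "exhibit", "proof", "record", "artifact", "documentation"]),
  ("condition", ["condition", "prerequisite", "criterion", "threshold", "trigger"]),
  ("monetary_amount", ["amount", "price", "cost", "fee", "fine", "budget", "salary", "payment", "dollar", "euro"]),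
  ("account", ["account", "fund", "budget", "grant", "allocation"]),
  ("transaction", ["transaction", "transfer", "payment", "disbursement", "receipt"]),
  ("risk", ["risk", "hazard", "threat", "vulnerability", "danger", "exposure"]),
  ("control", ["control", "safeguard", "measure", "mitigation", "countermeasure", "protection"]),
  ("finding", ["finding", "recommendation", "observation", "conclusion", "opinion", "assessment"]),
  ("status", ["status", "state", "phase", "stage", "progress", "outcome"]),
  ("reference", ["reference", "citation", "source", "bibliography", "footnote"]),
  ("document", ["document", "report", "letter", "memo", "brief", "filing", "submission"])]

def map_entity_type_py (extracted_text : String) (classification : String) (valid_types : List String) : String :=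
  if PySem.Set.contains valid_types classification then classification
  else
    let search_text := PySem.Chars.lower (extracted_text.toList ++ ' ' :: classification.toList)
    let best := pvTable.foldl (fun acc tk =>
      if PySem.Set.contains valid_types tk.1 then
        tk.2.foldl (fun acc kw =>
          if PySem.Chars.isIn kw.toList search_text then
            if acc.1 < kw.toList.length then (kw.toList.length, tk.1) else acc
          else acc) acc
      else acc) (0, "concept")
    best.2

-- ===== PORT B =====
-- the module constant _PAIRS_RAW: the flat (keyword, type) pair list, in table order
def pvFlat : List (String × String) := [
  ("person", "person"),
  ("individual", "person"),
  ("man", "person"),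
  ("woman", "person"),
  ("officer", "person"),
  ("employee", "person"),
  ("manager", "person"),
  ("director", "person"),
  ("witness", "person"),
  ("organization", "organization"),
  ("company", "organization"),
  ("corporation", "organization"),
  ("firm", "organization"),
  ("institution", "organization"),
  ("agency", "organization"),
  ("department", "organization"),
  ("ministry", "organization"),
  ("authority", "authority"),
  ("government", "authority"),
  ("regulator", "authority"),
  ("commission", "authority"),
  ("board", "authority"),
  ("council", "authority"),
  ("tribunal", "authority"),
  ("law", "legal_instrument"),
  ("act", "legal_instrument"),
  ("regulation", "legal_instrument"),
  ("statute", "legal_instrument"),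
  ("ordinance", "legal_instrument"),
  ("policy", "legal_instrument"),
  ("directive", "legal_instrument"),
  ("treaty", "legal_instrument"),
  ("code", "legal_instrument"),
  ("permission", "permission"),
  ("license", "permission"),
  ("permit", "permission"),
  ("approval", "permission"),
  ("authorization", "permission"),
  ("certificate", "permission"),
  ("exemption", "permission"),
  ("obligation", "obligation"),
  ("requirement", "obligation"),
  ("duty", "obligation"),
  ("mandate", "obligation"),
  ("compliance", "obligation"),
  ("violation", "violation"),
  ("offence", "violation"),
  ("offense", "violation"),
  ("breach", "violation"),
  ("infringement", "violation"),
  ("crime", "violation"),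
  ("misconduct", "violation"),
  ("role", "role"),
  ("title", "role"),
  ("position", "role"),
  ("rank", "role"),
  ("designation", "role"),
  ("occupation", "role"),
  ("group", "group"),
  ("team", "group"),
  ("committee", "group"),
  ("unit", "group"),
  ("division", "group"),
  ("taskforce", "group"),
  ("location", "location"),
  ("address", "location"),
  ("place", "location"),
  ("city", "location"),
  ("town", "location"),
  ("village", "location"),
  ("street", "location"),
  ("road", "location"),
  ("facility", "facility"),
  ("building", "facility"),
  ("office", "facility"),
  ("warehouse", "facility"),
  ("plant", "facility"),
  ("site", "facility"),
  ("headquarters", "facility"),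
  ("region", "region"),
  ("jurisdiction", "region"),
  ("district", "region"),
  ("state", "region"),
  ("province", "region"),
  ("country", "region"),
  ("territory", "region"),
  ("zone", "region"),
  ("date", "date"),
  ("day", "date"),
  ("month", "date"),
  ("year", "date"),
  ("event", "event"),
  ("incident", "event"),
  ("meeting", "event"),
  ("hearing", "event"),
  ("trial", "event"),
  ("conference", "event"),
  ("ceremony", "event"),
  ("occurrence", "event"),
  ("period", "period"),
  ("duration", "period"),
  ("term", "period"),
  ("timeframe", "period"),
  ("deadline", "period"),
  ("interval", "period"),
  ("concept", "concept"),
  ("topic", "concept"),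
  ("idea", "concept"),
  ("theme", "concept"),
  ("principle", "concept"),
  ("theory", "concept"),
  ("subject", "concept"),
  ("technology", "technology"),
  ("system", "technology"),
  ("software", "technology"),
  ("platform", "technology"),
  ("tool", "technology"),
  ("application", "technology"),
  ("database", "technology"),
  ("method", "method"),
  ("process", "method"),
  ("procedure", "method"),
  ("workflow", "method"),
  ("protocol", "method"),
  ("technique", "method"),
  ("approach", "method"),
  ("standard", "standard"),
  ("specification", "standard"),
  ("norm", "standard"),
  ("guideline", "standard"),
  ("benchmark", "standard"),
  ("framework", "standard"),
  ("metric", "metric"),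
  ("kpi", "metric"),
  ("indicator", "metric"),
  ("measure", "metric"),
  ("score", "metric"),
  ("rate", "metric"),
  ("percentage", "metric"),
  ("evidence", "evidence"),
  ("exhibit", "evidence"),
  ("proof", "evidence"),
  ("record", "evidence"),
  ("artifact", "evidence"),
  ("documentation", "evidence"),
  ("condition", "condition"),
  ("prerequisite", "condition"),
  ("criterion", "condition"),
  ("threshold", "condition"),
  ("trigger", "condition"),
  ("amount", "monetary_amount"),
  ("price", "monetary_amount"),
  ("cost", "monetary_amount"),
  ("fee", "monetary_amount"),
  ("fine", "monetary_amount"),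
  ("budget", "monetary_amount"),
  ("salary", "monetary_amount"),
  ("payment", "monetary_amount"),
  ("dollar", "monetary_amount"),
  ("euro", "monetary_amount"),
  ("account", "account"),
  ("fund", "account"),
  ("budget", "account"),
  ("grant", "account"),
  ("allocation", "account"),
  ("transaction", "transaction"),
  ("transfer", "transaction"),
  ("payment", "transaction"),
  ("disbursement", "transaction"),
  ("receipt", "transaction"),
  ("risk", "risk"),
  ("hazard", "risk"),
  ("threat", "risk"),
  ("vulnerability", "risk"),
  ("danger", "risk"),
  ("exposure", "risk"),
  ("control", "control"),
  ("safeguard", "control"),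
  ("measure", "control"),
  ("mitigation", "control"),
  ("countermeasure", "control"),
  ("protection", "control"),
  ("finding", "finding"),
  ("recommendation", "finding"),
  ("observation", "finding"),
  ("conclusion", "finding"),
  ("opinion", "finding"),
  ("assessment", "finding"),
  ("status", "status"),
  ("state", "status"),
  ("phase", "status"),
  ("stage", "status"),
  ("progress", "status"),
  ("outcome", "status"),
  ("reference", "reference"),
  ("citation", "reference"),
  ("source", "reference"),
  ("bibliography", "reference"),
  ("footnote", "reference"),
  ("document", "document"),
  ("report", "document"),
  ("letter", "document"),
  ("memo", "document"),
  ("brief", "document"),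
  ("filing", "document"),
  ("submission", "document")]

-- the module constant _PAIRS: _PAIRS_RAW stably sorted longest keyword first
def pvSorted : List (String × String) :=
  PySem.List.sorted pvFlat (fun p => p.1.toList.length) true

-- the helper _first_match: recursive early-exit scan down the sorted pair list
def pvFirstMatch (pairs : List (String × String)) (hay : List Char) (valid_types : List String) : String :=
  match pairs with
  | [] => "concept"
  | (kw, t) :: rest =>
    if PySem.Set.contains valid_types t && PySem.Chars.isIn kw.toList hay then t
    else pvFirstMatch rest hay valid_types

def map_entity_type_py_alt (extracted_text : String) (classification : String) (valid_types : List String) : String :=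
  if PySem.Set.contains valid_types classification then classification
  else
    let hay := PySem.Chars.lower extracted_text.toList ++ ' ' :: PySem.Chars.lower classification.toList
    pvFirstMatch pvSorted hay valid_types

-- ===== PRECONDITION & SPEC =====
def Spec_map_entity_type_py (extracted_text : String) (classification : String) (valid_types : List String) (out : String) : Prop := out = map_entity_type_py_alt extracted_text classification valid_types
instance (extracted_text : String) (classification : String) (valid_types : List String) (out : String) : Decidable (Spec_map_entity_type_py extracted_text classification valid_types out) := by unfold Spec_map_entity_type_py; infer_instance

-- ===== CLAIM (what is proved, stated in full; the proofs are below) =====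
def Claim_equal_map_entity_type_py : Prop := ∀ (extracted_text : String) (classification : String) (valid_types : List String), Dom_map_entity_type_py extracted_text classification valid_types → Spec_map_entity_type_py extracted_text classification valid_types (map_entity_type_py extracted_text classification valid_types)

-- ===== LEMMAS AND PROOFS =====

-- key of a pair: the keyword's length
def pvKey (e : String × String) : Nat := e.1.toList.length

-- A's accumulator step over a flattened (keyword, type) pair
def pvStep (p : String × String → Bool) (acc : Nat × String) (e : String × String) : Nat × String :=
  if p e then (if acc.1 < pvKey e then (pvKey e, e.2) else acc) else acc

-- "current best" as an option: a later pair replaces the best only if strictly longer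
def pvCombR (p : String × String → Bool) (r : Option (String × String)) (e : String × String) : Option (String × String) :=
  match r with
  | some f => if p e && decide (pvKey f < pvKey e) then some e else some f
  | none => if p e then some e else none

def pvOut (r : Option (String × String)) : Nat × String :=
  match r with
  | some f => (pvKey f, f.2)
  | none => (0, "concept")

-- first-while-longest selection, recursing on the tail (earlier pair wins ties)
def pvPick (p : String × String → Bool) : List (String × String) → Option (String × String)
  | [] => none
  | e :: l =>
    if p e then
      match pvPick p l with
      | some f => if pvKey e < pvKey f then some f else some e
      | none => some e
    else pvPick p l

theorem pvPick_mem (p : String × String → Bool) (l : List (String × String)) (f : String × String)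
    (h : pvPick p l = some f) : f ∈ l := by
  induction l with
  | nil => simp [pvPick] at h
  | cons e l ih =>
    simp only [pvPick] at h
    by_cases hp : p e = true
    · simp only [hp, if_true] at h
      cases hr : pvPick p l with
      | none => rw [hr] at h; simp at h; simp [h]
      | some g =>
        rw [hr] at h
        by_cases hk : pvKey e < pvKey g
        · simp only [hk, if_true] at h
          have : f = g := by simpa using h.symm
          subst this
          exact List.mem_cons_of_mem _ (ih hr)
        · simp [hk] at h; simp [h]
    · simp only [hp] at h
      simp at h
      exact List.mem_cons_of_mem _ (ih h)

-- on a longest-first list, the first match is the pick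
theorem pvFind_eq_pick (p : String × String → Bool) (l : List (String × String))
    (h : l.Pairwise (fun a b => pvKey b ≤ pvKey a)) : l.find? p = pvPick p l := by
  induction l with
  | nil => rfl
  | cons e l ih =>
    rw [List.pairwise_cons] at h
    by_cases hp : p e = true
    · rw [List.find?_cons_of_pos hp]
      simp only [pvPick, hp, if_true]
      cases hr : pvPick p l with
      | none => rfl
      | some f =>
        have hf := pvPick_mem p l f hr
        have : pvKey f ≤ pvKey e := h.1 f hf
        simp [Nat.not_lt.mpr this]
    · rw [List.find?_cons_of_neg (by simp [hp]),
        ih h.2]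
      simp [pvPick, hp]

-- inserting a (later) pair into a longest-first list keeps it longest-first
theorem pvInsert_pairwise (x : String × String) (l : List (String × String))
    (h : l.Pairwise (fun a b => pvKey b ≤ pvKey a)) :
    (PySem.List.insertBy (fun a b => decide (pvKey b < pvKey a)) x l).Pairwise
      (fun a b => pvKey b ≤ pvKey a) := by
  induction l with
  | nil => simp [PySem.List.insertBy]
  | cons y l ih =>
    rw [List.pairwise_cons] at h
    simp only [PySem.List.insertBy]
    by_cases hb : pvKey y < pvKey x
    · simp only [hb, decide_true, if_true]
      refine List.pairwise_cons.mpr ⟨?_, List.pairwise_cons.mpr h⟩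
      intro z hz
      rcases List.mem_cons.mp hz with rfl | hz
      · omega
      · have := h.1 z hz; omega
    · simp only [hb, decide_false, Bool.false_eq_true, if_false]
      refine List.pairwise_cons.mpr ⟨?_, ih h.2⟩
      intro z hz
      rcases (PySem.List.mem_insertBy _ x z l).mp hz with rfl | hz
      · omega
      · exact h.1 z hz

-- inserting a later pair: the pick is updated as pvCombR (the later pair wins only if strictly longer)
theorem pvPick_insert (p : String × String → Bool) (x : String × String) (l : List (String × String))
    (h : l.Pairwise (fun a b => pvKey b ≤ pvKey a)) :
    pvPick p (PySem.List.insertBy (fun a b => decide (pvKey b < pvKey a)) x l)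
      = pvCombR p (pvPick p l) x := by
  induction l with
  | nil => simp [PySem.List.insertBy, pvPick, pvCombR]
  | cons y l ih =>
    rw [List.pairwise_cons] at h
    simp only [PySem.List.insertBy]
    by_cases hb : pvKey y < pvKey x
    · -- x goes in front of y :: l
      simp only [hb, decide_true, if_true]
      -- every element of y :: l is at most pvKey y < pvKey x
      have hlt : ∀ f, pvPick p (y :: l) = some f → pvKey f < pvKey x := by
        intro f hf
        rcases List.mem_cons.mp (pvPick_mem p (y :: l) f hf) with rfl | hf
        · exact hb
        · have := h.1 f hf; omega
      have hx : pvPick p (x :: y :: l)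
          = if p x = true then
              (match pvPick p (y :: l) with
               | some f => if pvKey x < pvKey f then some f else some x
               | none => some x)
            else pvPick p (y :: l) := rfl
      rw [hx]
      cases hr : pvPick p (y :: l) with
      | none => by_cases hp : p x = true <;> simp [pvCombR, hp]
      | some f =>
        have hfx := hlt f hr
        have h1 : ¬ pvKey x < pvKey f := Nat.lt_asymm hfx
        by_cases hp : p x = true <;> simp [pvCombR, hp, h1, hfx]
    · -- y stays in front
      simp only [hb, decide_false, Bool.false_eq_true, if_false]
      simp only [pvPick]
      rw [ih h.2]
      have hxy : pvKey x ≤ pvKey y := Nat.not_lt.mp hb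
      cases hr : pvPick p l with
      | none =>
        by_cases hp : p x = true <;> by_cases hq : p y = true <;>
          simp [pvCombR, hp, hq]
      | some f =>
        by_cases hp : p x = true <;> by_cases hq : p y = true <;>
          by_cases hfx : pvKey f < pvKey x <;>
          simp [pvCombR, hp, hq, hfx] <;> try (split_ifs <;> simp_all <;> omega)

-- the stable longest-first insertion sort leaves the pick as the left fold of pvCombR
theorem pvPick_foldl_insert (p : String × String → Bool) (l acc : List (String × String))
    (h : acc.Pairwise (fun a b => pvKey b ≤ pvKey a)) :
    pvPick p (l.foldl (fun acc x => PySem.List.insertBy (fun a b => decide (pvKey b < pvKey a)) x acc) acc)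
      = l.foldl (pvCombR p) (pvPick p acc) := by
  induction l generalizing acc with
  | nil => rfl
  | cons x l ih =>
    simp only [List.foldl_cons]
    rw [ih _ (pvInsert_pairwise x acc h), pvPick_insert p x acc h]

-- A's accumulator fold is pvOut of the pvCombR fold (keywords are nonempty)
theorem pvFold_step_eq (p : String × String → Bool) (l : List (String × String)) (r : Option (String × String))
    (h : ∀ e ∈ l, 0 < pvKey e) :
    l.foldl (pvStep p) (pvOut r) = pvOut (l.foldl (pvCombR p) r) := by
  induction l generalizing r with
  | nil => rfl
  | cons e l ih =>
    simp only [List.foldl_cons]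
    have he : 0 < pvKey e := h e (List.mem_cons_self ..)
    have hstep : pvStep p (pvOut r) e = pvOut (pvCombR p r e) := by
      cases r with
      | none =>
        by_cases hp : p e = true <;> simp [pvStep, pvCombR, pvOut, hp, he]
      | some f =>
        by_cases hp : p e = true <;> by_cases hk : pvKey f < pvKey e <;>
          simp [pvStep, pvCombR, pvOut, hp, hk]
    rw [hstep, ih _ (fun e he => h e (List.mem_cons_of_mem _ he))]

-- A's nested fold over the table is the flat fold over the (keyword, type) pairs
theorem pvFlatten (valid : List String) (s : List Char) (items : List (String × List String))
    (acc : Nat × String) :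
    items.foldl (fun acc tk =>
      if PySem.Set.contains valid tk.1 then
        tk.2.foldl (fun acc kw =>
          if PySem.Chars.isIn kw.toList s then
            if acc.1 < kw.toList.length then (kw.toList.length, tk.1) else acc
          else acc) acc
      else acc) acc
    = (items.flatMap fun tk => tk.2.map fun kw => (kw, tk.1)).foldl
        (pvStep (fun e => PySem.Set.contains valid e.2 && PySem.Chars.isIn e.1.toList s)) acc := by
  induction items generalizing acc with
  | nil => rfl
  | cons tk items ih =>
    simp only [List.foldl_cons, List.flatMap_cons, List.foldl_append]
    rw [← ih]
    congr 1
    by_cases hv : PySem.Set.contains valid tk.1 = true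
    · simp only [hv, if_true]
      induction tk.2 generalizing acc with
      | nil => rfl
      | cons kw kws ihk =>
        simp only [List.foldl_cons, List.map_cons]
        have hstep : pvStep (fun e => PySem.Set.contains valid e.2 && PySem.Chars.isIn e.1.toList s)
            acc (kw, tk.1)
            = if PySem.Chars.isIn kw.toList s then
                if acc.1 < kw.toList.length then (kw.toList.length, tk.1) else acc
              else acc := by
          have hv' : tk.1 ∈ valid := (PySem.Set.contains_iff _ _).mp hv
          simp [pvStep, pvKey, hv']
        rw [hstep, ihk]
    · simp only [hv, Bool.false_eq_true, if_false]
      induction tk.2 generalizing acc with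
      | nil => rfl
      | cons kw kws ihk =>
        simp only [List.map_cons, List.foldl_cons]
        have hstep : pvStep (fun e => PySem.Set.contains valid e.2 && PySem.Chars.isIn e.1.toList s)
            acc (kw, tk.1) = acc := by
          have hv' : tk.1 ∉ valid := fun h => hv ((PySem.Set.contains_iff _ _).mpr h)
          simp [pvStep, hv']
        rw [hstep, ← ihk]

-- every keyword in the table is nonempty
set_option maxRecDepth 8192 in
theorem pvTable_pos : ∀ e ∈ (pvTable.flatMap fun tk => tk.2.map fun kw => (kw, tk.1)), 0 < pvKey e := by
  decide

-- lower maps characters independently, so it splits over the space-joined concatenation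
theorem pvLower_split (a b : List Char) :
    PySem.Chars.lower (a ++ ' ' :: b) = PySem.Chars.lower a ++ ' ' :: PySem.Chars.lower b := by
  simp [PySem.Chars.lower, show PySem.Chars.lowerChar ' ' = ' ' from rfl]

-- B's recursive scan is the first match of the list
theorem pvFirstMatch_eq_find (hay : List Char) (v : List String) (l : List (String × String)) :
    pvFirstMatch l hay v
      = (match l.find? (fun e => PySem.Set.contains v e.2 && PySem.Chars.isIn e.1.toList hay) with
         | some e => e.2
         | none => "concept") := by
  induction l with
  | nil => rfl
  | cons e l ih =>
    obtain ⟨kw, t⟩ := e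
    by_cases hp : (PySem.Set.contains v t && PySem.Chars.isIn kw.toList hay) = true
    · rw [List.find?_cons_of_pos (by simpa using hp)]
      simp only [pvFirstMatch]
      rw [if_pos hp]
    · rw [List.find?_cons_of_neg (by simpa using hp)]
      simp only [pvFirstMatch, hp, Bool.false_eq_true, if_false]
      exact ih

-- B's flat pair list is exactly the flattening of A's table
set_option maxRecDepth 16384 in
theorem pvFlat_eq : (pvTable.flatMap fun tk => tk.2.map fun kw => (kw, tk.1)) = pvFlat := by rfl

-- ===== VERDICT (by name: the statement is the Claim_ definition above) =====
set_option maxRecDepth 16384 in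
theorem map_entity_type_py_spec : Claim_equal_map_entity_type_py := by
  intro extracted_text classification valid_types _
  unfold Spec_map_entity_type_py map_entity_type_py map_entity_type_py_alt
  by_cases hc : PySem.Set.contains valid_types classification = true
  · have hc' : classification ∈ valid_types := (PySem.Set.contains_iff _ _).mp hc
    simp [hc']
  · simp only [hc, Bool.false_eq_true, if_false]
    set s := PySem.Chars.lower (extracted_text.toList ++ ' ' :: classification.toList) with hs
    set p := fun e : String × String =>
      PySem.Set.contains valid_types e.2 && PySem.Chars.isIn e.1.toList s with hp
    have hsplit : PySem.Chars.lower extracted_text.toList ++ ' ' :: PySem.Chars.lower classification.toList = s :=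
      (pvLower_split _ _).symm
    rw [hsplit, pvFirstMatch_eq_find s valid_types pvSorted]
    set flatL := pvTable.flatMap fun tk => tk.2.map fun kw => (kw, tk.1) with hflat
    rw [pvFlatten valid_types s pvTable (0, "concept")]
    rw [show ((0 : Nat), "concept") = pvOut none from rfl,
      pvFold_step_eq p flatL none pvTable_pos]
    have h3 : pvSorted.find? p = pvPick p pvSorted := by
      apply pvFind_eq_pick
      exact PySem.List.sorted_pairwise_rev pvFlat pvKey
    have h4 : pvPick p pvSorted = flatL.foldl (pvCombR p) none := by
      show pvPick p (PySem.List.sorted pvFlat (fun e => e.1.toList.length) true) = _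
      rw [PySem.List.sorted_rev_eq_foldl_insertBy, ← pvFlat_eq]
      exact pvPick_foldl_insert p flatL [] List.Pairwise.nil
    rw [h3, h4]
    cases flatL.foldl (pvCombR p) none <;> rfl
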